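-- pv_equiv track=rewrite | github.com/HallgrimurICE/MasterThesis | src/diplomacy/negotiation/contracts.py | _intersect_allowed
-- ===== SOURCE A (Python) =====
-- from typing import FrozenSet, Optional, Sequence
--
-- def _intersect_allowed(
--     legal_actions: Sequence[int],
--     restrictions: Sequence[FrozenSet[int]],
-- ) -> Sequence[int]:
--     """Return actions that satisfy all restrictions, falling back if empty."""
--
--     if not restrictions:
--         return legal_actions
--     intersection = set(legal_actions)
--     for subset in restrictions:
--         intersection.intersection_update(subset)
--     if not intersection:
--         return legal_actions
--     return [action for action in legal_actions if action in intersection]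
-- ===== SOURCE B (Python) =====
-- def _narrow(actions, restrictions):
--     """Recursively narrow the action list by one restriction at a time."""
--     if not restrictions:
--         return actions
--     head = restrictions[0]
--     return _narrow([a for a in actions if a in head], restrictions[1:])
--
--
-- def _intersect_allowed(legal_actions, restrictions):
--     """Return actions that satisfy all restrictions, falling back if empty."""
--     if not restrictions:
--         return legal_actions
--     narrowed = _narrow(legal_actions, restrictions)
--     if not narrowed:
--         return legal_actions
--     return narrowed
-- ===== Notes on version B (the rewrite author's own statement) =====
-- stated objective: alternative
-- what changed: Replaces A's precomputed intersection set (set(legal_actions) shrunk by intersection_update, then a final membership pass over legal_actions) with a recursive narrowing of the action list itself, filtering by one restriction at a time with no intermediate set and no final pass.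
import Mathlib
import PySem

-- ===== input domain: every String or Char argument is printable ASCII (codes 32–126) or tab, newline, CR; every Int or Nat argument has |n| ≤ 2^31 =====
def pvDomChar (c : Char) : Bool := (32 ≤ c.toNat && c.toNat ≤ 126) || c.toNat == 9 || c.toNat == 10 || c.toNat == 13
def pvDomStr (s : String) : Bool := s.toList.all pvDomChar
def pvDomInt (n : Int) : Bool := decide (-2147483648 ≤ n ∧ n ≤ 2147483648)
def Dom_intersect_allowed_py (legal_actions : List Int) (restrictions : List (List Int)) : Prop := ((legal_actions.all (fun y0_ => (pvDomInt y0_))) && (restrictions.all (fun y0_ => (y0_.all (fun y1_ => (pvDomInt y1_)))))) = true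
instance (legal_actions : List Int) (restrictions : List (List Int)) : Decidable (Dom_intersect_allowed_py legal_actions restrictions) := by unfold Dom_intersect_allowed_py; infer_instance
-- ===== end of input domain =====

-- B replaces A's precomputed intersection set with a recursive narrowing of the action list,
-- one restriction at a time (objective: alternative; not measured faster).


-- ===== PORT A =====
-- A: build set(legal_actions), shrink it with intersection_update per restriction, then one
-- membership pass; two fallbacks returning legal_actions. The final result is a filter by set
-- membership, so the intersection set's (unmodelled) iteration order never reaches the output.
def intersect_allowed_py (legal_actions : List Int) (restrictions : List (List Int)) : List Int :=
  if restrictions = [] then legal_actions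
  else
    let intersection := restrictions.foldl
      (fun s subset => s.filter (fun a => subset.contains a)) (PySem.Set.ofList legal_actions)
    if intersection = [] then legal_actions
    else legal_actions.filter (fun a => intersection.contains a)

-- ===== PORT B =====
-- B helper: recursively narrow the action list by one restriction at a time.
def pvNarrow : List Int → List (List Int) → List Int
  | actions, [] => actions
  | actions, head :: rest => pvNarrow (actions.filter (fun a => head.contains a)) rest

-- B: narrow legal_actions through all restrictions; same two fallbacks as A.
def intersect_allowed_py_alt (legal_actions : List Int) (restrictions : List (List Int)) : List Int :=
  if restrictions = [] then legal_actions
  else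
    let narrowed := pvNarrow legal_actions restrictions
    if narrowed = [] then legal_actions
    else narrowed

-- ===== PRECONDITION & SPEC =====
def Spec_intersect_allowed_py (legal_actions : List Int) (restrictions : List (List Int)) (out : List Int) : Prop := out = intersect_allowed_py_alt legal_actions restrictions
instance (legal_actions : List Int) (restrictions : List (List Int)) (out : List Int) : Decidable (Spec_intersect_allowed_py legal_actions restrictions out) := by unfold Spec_intersect_allowed_py; infer_instance

-- ===== CLAIM (what is proved, stated in full; the proofs are below) =====
def Claim_equal_intersect_allowed_py : Prop := ∀ (legal_actions : List Int) (restrictions : List (List Int)), Dom_intersect_allowed_py legal_actions restrictions → Spec_intersect_allowed_py legal_actions restrictions (intersect_allowed_py legal_actions restrictions)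

-- ===== LEMMAS AND PROOFS =====
-- B's recursive narrowing is a single filter by "in every restriction".
theorem pvNarrow_eq_filter (actions : List Int) (rs : List (List Int)) :
    pvNarrow actions rs = actions.filter (fun a => rs.all (fun r => r.contains a)) := by
  induction rs generalizing actions with
  | nil => simp [pvNarrow]
  | cons r rs ih =>
      rw [pvNarrow, ih, List.filter_filter]
      simp [Bool.and_comm]

-- Membership in A's folded intersection set: in the start set and in every restriction.
theorem mem_foldl_filter (p : Int → List Int → Bool) (rs : List (List Int)) (s : List Int) (a : Int) :
    a ∈ rs.foldl (fun s subset => s.filter (fun x => p x subset)) s ↔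
      a ∈ s ∧ ∀ r ∈ rs, p a r = true := by
  induction rs generalizing s with
  | nil => simp
  | cons r rs ih =>
      rw [List.foldl_cons, ih]
      simp [List.mem_filter]
      tauto

-- A's final membership pass equals B's narrowing.
theorem filter_eq_narrow (legal_actions : List Int) (restrictions : List (List Int)) :
    legal_actions.filter (fun a =>
        (restrictions.foldl (fun s subset => s.filter (fun a => subset.contains a))
          (PySem.Set.ofList legal_actions)).contains a)
      = pvNarrow legal_actions restrictions := by
  rw [pvNarrow_eq_filter]
  apply List.filter_congr
  intro a ha
  beta_reduce
  simp only [PySem.Set.contains_eq_listContains]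
  rw [Bool.eq_iff_iff, List.contains_iff_mem,
    mem_foldl_filter (fun x subset => subset.contains x)]
  simp [PySem.Set.mem_ofList, ha, List.all_eq_true]

-- A's intersection set is empty exactly when B's narrowed list is empty.
theorem empty_iff (legal_actions : List Int) (restrictions : List (List Int)) :
    (restrictions.foldl (fun s subset => s.filter (fun a => subset.contains a))
        (PySem.Set.ofList legal_actions)) = [] ↔
      pvNarrow legal_actions restrictions = [] := by
  rw [pvNarrow_eq_filter, List.eq_nil_iff_forall_not_mem, List.filter_eq_nil_iff]
  constructor
  · intro h a ha
    have := h a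
    rw [mem_foldl_filter (fun x subset => subset.contains x)] at this
    simp [PySem.Set.mem_ofList, ha, List.all_eq_true] at this ⊢
    exact this
  · intro h a hmem
    rw [mem_foldl_filter (fun x subset => subset.contains x)] at hmem
    simp [PySem.Set.mem_ofList] at hmem
    have := h a hmem.1
    simp [List.all_eq_true] at this
    obtain ⟨r, hr, hnr⟩ := this
    exact hnr (hmem.2 r hr)

-- ===== VERDICT (by name: the statement is the Claim_ definition above) =====
theorem intersect_allowed_py_spec : Claim_equal_intersect_allowed_py := by
  intro legal_actions restrictions _
  unfold Spec_intersect_allowed_py intersect_allowed_py intersect_allowed_py_alt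
  by_cases hr : restrictions = []
  · simp [hr]
  · simp only [hr, if_false]
    exact if_congr (empty_iff legal_actions restrictions) rfl
      (filter_eq_narrow legal_actions restrictions)
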